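-- pv_equiv track=rewrite | github.com/Maeglin1908/cryptopals-AES_ECB | aes.py | getRoundConstant
-- ===== SOURCE A (Python) =====
-- def getRoundConstant(n: int) -> int:
--     """
--     Calculate the Round Constant of the AES key schedule,
--     following this :
--     https://en.wikipedia.org/wiki/AES_key_schedule#Round_constants
--
--     Parameters
--     ---
--     n (int)
--         Number of the round
--     """
--     if n == 1:
--         return 1
--     else:
--         res = getRoundConstant(n-1)
--         if res < 0x80:
--             return 2*res
--         else:
--             return (2*res) ^ 0x11b
-- ===== SOURCE B (Python) =====
-- def getRoundConstant(n: int) -> int: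
--     """Iterative computation of the AES round constant."""
--     res = 1
--     for _ in range(2, n + 1):
--         res = 2 * res if res < 0x80 else (2 * res) ^ 0x11b
--     return res
-- ===== Notes on version B (the rewrite author's own statement) =====
-- stated objective: simpler
-- what changed: Replaces the recursive descent with an iterative loop that maintains the running constant.
-- outside the precondition, e.g. on getRoundConstant(0): A raises RecursionError, B returns 1
import Mathlib
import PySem

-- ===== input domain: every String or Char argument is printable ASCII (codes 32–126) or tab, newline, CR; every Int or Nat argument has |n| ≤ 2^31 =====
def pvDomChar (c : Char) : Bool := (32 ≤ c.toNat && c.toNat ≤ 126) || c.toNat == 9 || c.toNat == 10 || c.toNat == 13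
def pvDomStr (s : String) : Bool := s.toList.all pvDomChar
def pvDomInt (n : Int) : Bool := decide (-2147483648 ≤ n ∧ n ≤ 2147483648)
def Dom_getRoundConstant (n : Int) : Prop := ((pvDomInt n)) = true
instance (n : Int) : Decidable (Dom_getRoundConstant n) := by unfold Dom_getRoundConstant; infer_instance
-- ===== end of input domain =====

-- B replaces A's recursion with an iterative loop over the same recurrence (simpler, no stack growth).

-- ===== PORT A =====
-- A recurses on n-1 with base case n == 1; for n ≤ 0 the Python recursion never
-- terminates (RecursionError), so those inputs are outside Pre_. The recursion is
-- transliterated structurally on n.toNat (= n for n ≥ 1).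
def getRoundConstantGo : Nat → Int
  | 0 => 1          -- unreachable under Pre_ (A raises there)
  | 1 => 1          -- 'if n == 1: return 1'
  | (k+2) =>        -- 'res = getRoundConstant(n-1); …'
      let res := getRoundConstantGo (k+1)
      if res < 0x80 then 2*res else PySem.Int.bxor (2*res) 0x11b

def getRoundConstant (n : Int) : Int := getRoundConstantGo n.toNat

-- ===== PORT B =====
-- Source B: res = 1; for _ in range(2, n+1): res = 2*res if res < 0x80 else (2*res) ^ 0x11b
def getRoundConstant_alt (n : Int) : Int :=
  (PySem.List.pyRange 2 (n+1) 1).foldl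
    (fun res _ => if res < 0x80 then 2*res else PySem.Int.bxor (2*res) 0x11b) 1

-- ===== PRECONDITION & SPEC =====
-- Pre_ excludes n ≤ 0, on which Python A recurses without a base case and raises RecursionError.
def Pre_getRoundConstant (n : Int) : Prop := 1 ≤ n
instance (n : Int) : Decidable (Pre_getRoundConstant n) := by unfold Pre_getRoundConstant; infer_instance
def pvWitness_getRoundConstant : Int := 5

def Spec_getRoundConstant (n : Int) (out : Int) : Prop := out = getRoundConstant_alt n
instance (n : Int) (out : Int) : Decidable (Spec_getRoundConstant n out) := by unfold Spec_getRoundConstant; infer_instance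

-- ===== CLAIM =====
def Claim_equal_getRoundConstant : Prop := ∀ (n : Int), Dom_getRoundConstant n → Pre_getRoundConstant n → Spec_getRoundConstant n (getRoundConstant n)
-- ===== LEMMAS AND PROOFS =====

theorem go_eq_fold : ∀ (k : Nat), 1 ≤ k →
    getRoundConstantGo k = (PySem.List.pyRange 2 ((k : Int)+1) 1).foldl
      (fun res _ => if res < 0x80 then 2*res else PySem.Int.bxor (2*res) 0x11b) 1 := by
  intro k
  induction k with
  | zero => omega
  | succ m ih =>
    intro _
    rcases Nat.eq_zero_or_pos m with hm | hm
    · subst hm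
      rw [PySem.List.pyRange_one_eq_nil (by norm_num)]
      rfl
    · have h2 : (2 : Int) ≤ (m : Int) + 1 := by omega
      have : ((m + 1 : Nat) : Int) + 1 = ((m : Int) + 1) + 1 := by push_cast; ring
      rw [this, PySem.List.pyRange_one_succ_right h2, List.foldl_append, ← ih hm]
      obtain ⟨j, rfl⟩ := Nat.exists_eq_add_of_le hm  -- m = 1 + j
      simp [getRoundConstantGo, Nat.add_comm 1 j, List.foldl]

theorem getRoundConstant_spec : Claim_equal_getRoundConstant := by
  intro n _ hpre
  unfold Spec_getRoundConstant getRoundConstant getRoundConstant_alt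
  have hk : 1 ≤ n.toNat := by unfold Pre_getRoundConstant at hpre; omega
  have hn : ((n.toNat : Int)) = n := by unfold Pre_getRoundConstant at hpre; omega
  rw [go_eq_fold n.toNat hk, hn]
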